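-- pv_equiv track=rewrite | github.com/airbnb/knowledge-repo | knowledge_repo/repositories/gitrepository.py | __get_path_from_ref
-- ===== SOURCE A (Python) =====
-- def __get_path_from_ref(ref):
--     refs = ref.split("/")
--     for i, ref in enumerate(refs):
--         if ref.endswith(".kp"):
--             break
--     if not ref.endswith(".kp"):
--         return None
--     return "/".join(refs[: i + 1])
-- ===== SOURCE B (Python) =====
-- def __get_path_from_ref(ref):
--     prefix = None
--     for seg in reversed(ref.split("/")):
--         if seg.endswith(".kp"):
--             prefix = seg
--         elif prefix is not None:
--             prefix = seg + "/" + prefix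
--     return prefix
-- ===== Notes on version B (the rewrite author's own statement) =====
-- stated objective: alternative
-- what changed: Replaces the indexed forward scan with break followed by a take-and-join pass by a single backwards fold over the segments that builds the result string directly (a later .kp match is overwritten by an earlier one), with no index bookkeeping, no break, and no join/slice step.
import Mathlib
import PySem

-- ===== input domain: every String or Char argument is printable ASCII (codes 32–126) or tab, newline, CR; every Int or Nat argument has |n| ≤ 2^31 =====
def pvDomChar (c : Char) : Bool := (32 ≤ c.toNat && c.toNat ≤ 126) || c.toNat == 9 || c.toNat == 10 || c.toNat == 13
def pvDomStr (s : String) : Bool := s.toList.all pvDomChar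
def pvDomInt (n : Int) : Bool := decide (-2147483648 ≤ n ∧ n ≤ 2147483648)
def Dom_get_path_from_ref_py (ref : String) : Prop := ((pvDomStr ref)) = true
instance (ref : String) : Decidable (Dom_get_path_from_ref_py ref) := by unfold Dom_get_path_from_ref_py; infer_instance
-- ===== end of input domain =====

-- B replaces A's indexed scan-with-break plus join(refs[:i+1]) by one backwards fold over the
-- segments that builds the prefix string directly; same cost, no index bookkeeping (objective: alternative).

-- ===== PORT A =====
-- the for/enumerate loop with break: returns (i, ref) as left by the loop
-- ([] is unreachable: str.split always returns a nonempty list)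
def pvALoop : List String → Nat → Nat × String
  | [], i => (i, "")
  | [x], i => (i, x)
  | x :: y :: t, i =>
    if PySem.Str.endswith x ".kp" then (i, x) else pvALoop (y :: t) (i + 1)

def get_path_from_ref_py (ref : String) : Option String :=
  let refs := (PySem.Str.split? ref "/").getD []   -- sep "/" ≠ "": split? is always some here
  let p := pvALoop refs 0
  if ¬ (PySem.Str.endswith p.2 ".kp") then none
  else some (PySem.Str.join "/" (refs.take (p.1 + 1)))

-- ===== PORT B =====
-- loop body of Source B (acc = prefix, seg = current segment, traversed in reverse)
def pvBStep (acc : Option String) (seg : String) : Option String :=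
  if PySem.Str.endswith seg ".kp" then some seg
  else
    match acc with
    | some p => some (seg ++ "/" ++ p)
    | none => none

def get_path_from_ref_py_alt (ref : String) : Option String :=
  (((PySem.Str.split? ref "/").getD []).reverse).foldl pvBStep none

-- ===== PRECONDITION & SPEC =====
def Spec_get_path_from_ref_py (ref : String) (out : Option String) : Prop := out = get_path_from_ref_py_alt ref
instance (ref : String) (out : Option String) : Decidable (Spec_get_path_from_ref_py ref out) := by unfold Spec_get_path_from_ref_py; infer_instance

-- ===== CLAIM (what is proved, stated in full; the proofs are below) =====
def Claim_equal_get_path_from_ref_py : Prop := ∀ (ref : String), Dom_get_path_from_ref_py ref → Spec_get_path_from_ref_py ref (get_path_from_ref_py ref)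

-- ===== LEMMAS AND PROOFS =====

-- A's whole computation, parametrised by the segment list
def pvACore (l : List String) : Option String :=
  let p := pvALoop l 0
  if ¬ (PySem.Str.endswith p.2 ".kp") then none
  else some (PySem.Str.join "/" (l.take (p.1 + 1)))

lemma strJoin_singleton (x : String) : PySem.Str.join "/" [x] = x := by
  simp [PySem.Str.join, PySem.Chars.join_singleton]

lemma strJoin_cons_cons (x y : String) (t : List String) :
    PySem.Str.join "/" (x :: y :: t) = x ++ "/" ++ PySem.Str.join "/" (y :: t) := by
  have h := PySem.Chars.join_cons_cons ("/".toList) x.toList y.toList (t.map String.toList)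
  simp only [PySem.Str.join, List.map_cons, h]
  apply String.toList_injective
  simp

lemma pvALoop_shift (l : List String) (i : Nat) :
    pvALoop l (i + 1) = ((pvALoop l i).1 + 1, (pvALoop l i).2) := by
  induction l, i using pvALoop.induct with
  | case1 i => simp [pvALoop]
  | case2 x i => simp [pvALoop]
  | case3 x y t i h =>
    have h' : PySem.Chars.endswith x.toList ['.','k','p'] = true := by simpa using h
    simp [pvALoop, h']
  | case4 x y t i h ih =>
    have h' : PySem.Chars.endswith x.toList ['.','k','p'] = false := by simpa using h
    simp [pvALoop, h', ih]

lemma pvACore_eq_foldr (l : List String) :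
    pvACore l = l.foldr (fun x a => pvBStep a x) none := by
  induction l with
  | nil =>
    simp [pvACore, pvALoop]
    decide
  | cons x l ih =>
    cases l with
    | nil =>
      by_cases h : PySem.Chars.endswith x.toList ['.','k','p'] = true
      · simp [pvACore, pvALoop, pvBStep, h, strJoin_singleton]
      · have h' : PySem.Chars.endswith x.toList ['.','k','p'] = false := by simpa using h
        simp [pvACore, pvALoop, pvBStep, h']
    | cons y t =>
      by_cases hx : PySem.Str.endswith x ".kp" = true
      · have hx' : PySem.Chars.endswith x.toList ['.','k','p'] = true := by simpa using hx
        simp [pvACore, pvALoop, pvBStep, hx', strJoin_singleton]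
      · have hshift := pvALoop_shift (y :: t) 0
        simp only [Nat.zero_add] at hshift
        have hx' : PySem.Chars.endswith x.toList ['.','k','p'] = false := by simpa using hx
        have h1 : pvALoop (x :: y :: t) 0 = ((pvALoop (y :: t) 0).1 + 1, (pvALoop (y :: t) 0).2) := by
          simp [pvALoop, hx', hshift]
        have hA : pvACore (x :: y :: t)
            = (if ¬ (PySem.Str.endswith (pvALoop (y :: t) 0).2 ".kp" = true) then none
               else some (x ++ "/" ++ PySem.Str.join "/" (y :: t.take (pvALoop (y :: t) 0).1))) := by
          simp only [pvACore, h1, List.take_succ_cons, strJoin_cons_cons]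
        have hA' : pvACore (y :: t)
            = (if ¬ (PySem.Str.endswith (pvALoop (y :: t) 0).2 ".kp" = true) then none
               else some (PySem.Str.join "/" (y :: t.take (pvALoop (y :: t) 0).1))) := by
          simp only [pvACore, List.take_succ_cons]
        rw [List.foldr_cons, ← ih, hA, hA']
        by_cases hs : PySem.Str.endswith (pvALoop (y :: t) 0).2 ".kp" = true
        · rw [if_neg (not_not_intro hs), if_neg (not_not_intro hs)]
          unfold pvBStep
          rw [if_neg hx]
        · rw [if_pos hs, if_pos hs]
          unfold pvBStep
          rw [if_neg hx]

lemma alt_eq_foldr (ref : String) :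
    get_path_from_ref_py_alt ref
      = ((PySem.Str.split? ref "/").getD []).foldr (fun x a => pvBStep a x) none := by
  simp [get_path_from_ref_py_alt, List.foldl_reverse]

-- ===== VERDICT (by name: the statement is the Claim_ definition above) =====
theorem get_path_from_ref_py_spec : Claim_equal_get_path_from_ref_py := by
  intro ref _
  show get_path_from_ref_py ref = get_path_from_ref_py_alt ref
  rw [alt_eq_foldr, ← pvACore_eq_foldr]
  rfl
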